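-- pv_equiv track=rewrite | github.com/imrying/page_rank | pagerank_script2.py | generateinbounddictionary
-- ===== SOURCE A (Python) =====
-- def generateinbounddictionary(web):
--     '''
--     generates a dictonary like web, but instead of outgoing
--     links it has its ingoing links
--     '''
--     inbounddict = {}
--     for _page in web:
--         inbounddict[_page] = []
--         for outpage in web:
--             if _page in web[outpage]:
--                 inbounddict[_page].append(outpage)
--     return inbounddict
-- ===== SOURCE B (Python) =====
-- def generateinbounddictionary(web):
--     '''
--     generates a dictonary like web, but instead of outgoing
--     links it has its ingoing links
--     '''
--     acc = {}
--     for outpage in web: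
--         for target in dict.fromkeys(web[outpage]):
--             acc[target] = acc.get(target, []) + [outpage]
--     return {page: acc.get(page, []) for page in web}
-- ===== Notes on version B (the rewrite author's own statement) =====
-- stated objective: faster
-- what changed: B makes one accumulation pass over the adjacency lists, collecting inbound sources per target into a scratch dict (no pre-initialised result, appends for targets A never scans are simply dropped), then builds the result in a final comprehension over the pages; A instead scans the entire web once per page.
import Mathlib
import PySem

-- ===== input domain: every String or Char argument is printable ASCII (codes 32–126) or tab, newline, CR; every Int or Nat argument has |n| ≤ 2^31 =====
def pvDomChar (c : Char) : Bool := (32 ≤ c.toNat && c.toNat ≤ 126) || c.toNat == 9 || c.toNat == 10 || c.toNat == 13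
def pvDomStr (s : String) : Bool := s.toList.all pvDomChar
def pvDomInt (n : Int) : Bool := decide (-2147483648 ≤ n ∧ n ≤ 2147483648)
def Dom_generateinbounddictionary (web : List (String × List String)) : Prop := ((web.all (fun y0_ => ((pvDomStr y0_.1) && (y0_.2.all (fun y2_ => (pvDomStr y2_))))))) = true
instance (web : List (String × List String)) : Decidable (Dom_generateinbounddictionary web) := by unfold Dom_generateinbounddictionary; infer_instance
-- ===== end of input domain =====

-- B replaces A's per-page scan of the whole web (quadratic in the number of pages) by one
-- accumulation pass over the adjacency lists into a scratch dict, followed by a final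
-- comprehension over the pages (faster).

-- ===== PORT A =====
def generateinbounddictionary (web : List (String × List String)) : List (String × List String) :=
  (web.foldl
    (fun d p =>
      web.foldl
        (fun d2 q =>
          if p.1 ∈ (PySem.Dict.mk web).getD q.1 [] then
            d2.modify p.1 [] (fun v => v ++ [q.1])
          else d2)
        (d.insert p.1 []))
    PySem.Dict.empty).items

-- ===== PORT B =====
def generateinbounddictionary_alt (web : List (String × List String)) : List (String × List String) :=
  let acc :=
    web.foldl
      (fun a q =>
        (PySem.List.dedup q.2).foldl
          (fun a2 t => a2.insert t (a2.getD t [] ++ [q.1]))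
          a)
      PySem.Dict.empty
  web.map (fun p => (p.1, acc.getD p.1 []))

-- ===== PRECONDITION & SPEC =====
-- Python A's parameter is a dict; its association-list encoding has unique keys, so Pre_
-- excludes only duplicate-key lists, which correspond to no Python dict input at all.
def Pre_generateinbounddictionary (web : List (String × List String)) : Prop :=
  (web.map Prod.fst).Nodup
instance (web : List (String × List String)) : Decidable (Pre_generateinbounddictionary web) := by unfold Pre_generateinbounddictionary; infer_instance

def pvWitness_generateinbounddictionary : (List (String × List String)) :=
  [("a", ["b", "c"]), ("b", ["a", "a"])]

def Spec_generateinbounddictionary (web : List (String × List String)) (out : List (String × List String)) : Prop := out = generateinbounddictionary_alt web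
instance (web : List (String × List String)) (out : List (String × List String)) : Decidable (Spec_generateinbounddictionary web out) := by unfold Spec_generateinbounddictionary; infer_instance

-- ===== CLAIM (what is proved, stated in full; the proofs are below) =====
def Claim_equal_generateinbounddictionary : Prop := ∀ (web : List (String × List String)), Dom_generateinbounddictionary web → Pre_generateinbounddictionary web → Spec_generateinbounddictionary web (generateinbounddictionary web)

-- ===== LEMMAS AND PROOFS =====

-- A's inner loop never changes the key set (the current page's key is already present).
theorem innerA_keys (c : (String × List String) → Prop) [DecidablePred c] (k : String)
    (l : List (String × List String)) :
    ∀ (d : PySem.Dict String (List String)), d.contains k = true →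
      (l.foldl (fun d2 q => if c q then d2.modify k [] (fun v => v ++ [q.1]) else d2) d).keys = d.keys := by
  induction l with
  | nil => intro d _; rfl
  | cons q l ih =>
    intro d hk
    simp only [List.foldl_cons]
    by_cases hc : c q
    · simp only [hc, if_pos]
      rw [ih _ (by rw [PySem.Dict.contains_modify]; simp)]
      rw [PySem.Dict.keys_modify, PySem.Dict.keys_insert_of_contains _ _ hk]
    · simp only [hc, if_neg, not_false_iff]
      exact ih d hk

-- A's inner loop appends to the entry at k the first components of the elements satisfying c.
theorem innerA_getD (c : (String × List String) → Prop) [DecidablePred c] (k : String)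
    (l : List (String × List String)) :
    ∀ (d : PySem.Dict String (List String)) (x : String),
      (l.foldl (fun d2 q => if c q then d2.modify k [] (fun v => v ++ [q.1]) else d2) d).getD x [] =
        if x = k then d.getD k [] ++ (l.filter (fun q => decide (c q))).map Prod.fst
        else d.getD x [] := by
  induction l with
  | nil => intro d x; by_cases hx : x = k <;> simp [hx]
  | cons q l ih =>
    intro d x
    simp only [List.foldl_cons]
    by_cases hc : c q
    · simp only [hc, if_pos, List.filter_cons, decide_true, List.map_cons]
      rw [ih]
      by_cases hx : x = k
      · subst hx
        simp only [PySem.Dict.getD_modify]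
        simp
      · simp [hx, PySem.Dict.getD_modify]
    · simp only [hc, if_neg, not_false_iff]
      rw [ih]
      simp [hc]

-- A's outer loop: keys are the processed pages in order; the entry of page k lists the
-- first components of the web entries whose looked-up value contains k.
theorem outerA_spec (web : List (String × List String)) (l : List (String × List String)) :
    ∀ (d : PySem.Dict String (List String)),
      (∀ p ∈ l, d.contains p.1 = false) → (l.map Prod.fst).Nodup →
      ((l.foldl
          (fun d p =>
            web.foldl
              (fun d2 q =>
                if p.1 ∈ (PySem.Dict.mk web).getD q.1 [] then
                  d2.modify p.1 [] (fun v => v ++ [q.1])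
                else d2)
              (d.insert p.1 []))
          d).keys = d.keys ++ l.map Prod.fst ∧
       ∀ x, (l.foldl
          (fun d p =>
            web.foldl
              (fun d2 q =>
                if p.1 ∈ (PySem.Dict.mk web).getD q.1 [] then
                  d2.modify p.1 [] (fun v => v ++ [q.1])
                else d2)
              (d.insert p.1 []))
          d).getD x [] =
          if x ∈ l.map Prod.fst then
            (web.filter (fun q => decide (x ∈ (PySem.Dict.mk web).getD q.1 []))).map Prod.fst
          else d.getD x []) := by
  induction l with
  | nil => intro d _ _; simp
  | cons p l ih =>
    intro d hfresh hnd
    simp only [List.map_cons, List.nodup_cons] at hnd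
    have hfp : d.contains p.1 = false := hfresh p (List.mem_cons_self ..)
    simp only [List.foldl_cons]
    set d1 := web.foldl
        (fun d2 q =>
          if p.1 ∈ (PySem.Dict.mk web).getD q.1 [] then
            d2.modify p.1 [] (fun v => v ++ [q.1])
          else d2)
        (d.insert p.1 []) with hd1
    have hkeys1 : d1.keys = d.keys ++ [p.1] := by
      rw [hd1, innerA_keys (fun q => p.1 ∈ (PySem.Dict.mk web).getD q.1 []) p.1 web
            (d.insert p.1 []) (PySem.Dict.contains_insert_self d p.1 []),
          PySem.Dict.keys_insert_of_not_contains d [] hfp]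
    have hgetD1 : ∀ x, d1.getD x [] =
        if x = p.1 then (web.filter (fun q => decide (p.1 ∈ (PySem.Dict.mk web).getD q.1 []))).map Prod.fst
        else d.getD x [] := by
      intro x
      rw [hd1, innerA_getD (fun q => p.1 ∈ (PySem.Dict.mk web).getD q.1 []) p.1 web (d.insert p.1 []) x]
      by_cases hx : x = p.1
      · subst hx
        simp
      · simp [hx, PySem.Dict.getD_insert]
    have hfresh1 : ∀ r ∈ l, d1.contains r.1 = false := by
      intro r hr
      have h1 : r.1 ∉ d.keys := by
        have := hfresh r (List.mem_cons_of_mem _ hr)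
        intro hmem
        rw [← PySem.Dict.contains_iff_mem_keys] at hmem
        simp [this] at hmem
      have h2 : r.1 ≠ p.1 := by
        intro h
        exact hnd.1 (h ▸ List.mem_map_of_mem hr)
      by_contra hcc
      have : d1.contains r.1 = true := by
        cases h : d1.contains r.1
        · exact absurd h hcc
        · rfl
      rw [PySem.Dict.contains_iff_mem_keys, hkeys1] at this
      rcases List.mem_append.mp this with h | h
      · exact h1 h
      · exact h2 (List.mem_singleton.mp h)
    obtain ⟨ihk, ihg⟩ := ih d1 hfresh1 hnd.2
    refine ⟨by rw [ihk, hkeys1]; simp, ?_⟩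
    intro x
    rw [ihg x]
    by_cases hml : x ∈ l.map Prod.fst
    · simp [hml]
    · by_cases hx : x = p.1
      · subst hx
        simp [hml, hgetD1]
      · simp only [hml, if_neg, not_false_iff]
        rw [hgetD1 x]
        simp [hx, hml]

-- B's inner loop (over a duplicate-free target list) appends q1 once to each key in the list
-- (creating the entry if absent).
theorem innerB_getD (q1 : String) (ts : List String) :
    ∀ (d : PySem.Dict String (List String)), ts.Nodup → ∀ (x : String),
      (ts.foldl (fun a2 t => a2.insert t (a2.getD t [] ++ [q1])) d).getD x [] =
        if x ∈ ts then d.getD x [] ++ [q1] else d.getD x [] := by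
  induction ts with
  | nil => intro d _ x; simp
  | cons t ts ih =>
    intro d hnd x
    have htn : t ∉ ts := (List.nodup_cons.mp hnd).1
    simp only [List.foldl_cons]
    rw [ih _ hnd.of_cons]
    by_cases hm : x ∈ ts
    · have hxt : x ≠ t := fun h => htn (h ▸ hm)
      simp [hm, List.mem_cons, PySem.Dict.getD_insert, hxt]
    · by_cases hx : x = t
      · subst hx
        simp [hm]
      · simp [hm, hx, PySem.Dict.getD_insert]

-- B's accumulation pass: each key collects the first components of the processed pairs
-- whose second component contains it.
theorem outerB_getD (l : List (String × List String)) :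
    ∀ (d : PySem.Dict String (List String)) (x : String),
      (l.foldl
        (fun a q =>
          (PySem.List.dedup q.2).foldl
            (fun a2 t => a2.insert t (a2.getD t [] ++ [q.1]))
            a)
        d).getD x [] =
        d.getD x [] ++ (l.filter (fun q => decide (x ∈ q.2))).map Prod.fst := by
  induction l with
  | nil => intro d x; simp
  | cons q l ih =>
    intro d x
    simp only [List.foldl_cons]
    rw [ih, innerB_getD q.1 (PySem.List.dedup q.2) d (PySem.List.nodup_dedup q.2) x]
    simp only [PySem.List.mem_dedup, List.filter_cons]
    by_cases hm : x ∈ q.2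
    · simp [hm]
    · simp [hm]

-- the looked-up value of a key of web is its own second component (keys are unique)
theorem lookup_self (web : List (String × List String)) (h : (web.map Prod.fst).Nodup)
    (q : String × List String) (hq : q ∈ web) :
    (PySem.Dict.mk web).getD q.1 [] = q.2 := by
  exact PySem.Dict.getD_of_mem_items (PySem.Dict.mk web) (k := q.1) (v := q.2) hq h []

-- ===== VERDICT (by name: the statement is the Claim_ definition above) =====
theorem generateinbounddictionary_spec : Claim_equal_generateinbounddictionary := by
  intro web _ hpre
  unfold Spec_generateinbounddictionary generateinbounddictionary generateinbounddictionary_alt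
  -- characterize A's dict
  obtain ⟨hAk, hAg⟩ := outerA_spec web web PySem.Dict.empty (by intro p _; rfl) hpre
  have hAkeys := hAk
  rw [show (PySem.Dict.empty : PySem.Dict String (List String)).keys = [] from rfl,
      List.nil_append] at hAkeys
  rw [PySem.Dict.items_eq_map_keys _ (by rw [hAkeys]; exact hpre) [], hAkeys]
  -- B's result is a map over web; rewrite A's items (a map over web's keys) into the same shape
  rw [show web.map Prod.fst = web.map (fun p => p.1) from rfl, List.map_map]
  apply List.map_congr_left
  intro p hp
  have hA := hAg p.1
  rw [if_pos (List.mem_map_of_mem hp)] at hA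
  rw [Function.comp_apply, hA, outerB_getD web PySem.Dict.empty p.1]
  rw [show (PySem.Dict.empty : PySem.Dict String (List String)).getD p.1 [] = [] from rfl,
      List.nil_append]
  refine congrArg (fun lst => (p.1, List.map Prod.fst lst)) ?_
  apply List.filter_congr
  intro q hq
  rw [lookup_self web hpre q hq]
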